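-- pv_equiv track=rewrite | github.com/ainunnajib/dynaplan | backend/app/services/alm.py | _group_snapshot_entries
-- ===== SOURCE A (Python) =====
-- from typing import Any, Dict, List, Optional, Set, Tuple
--
-- def _group_snapshot_entries(
--     entries: List[Dict[str, Any]],
--     key: str,
-- ) -> Dict[str, List[Dict[str, Any]]]:
--     grouped: Dict[str, List[Dict[str, Any]]] = {}
--     for entry in entries:
--         group_key = str(entry.get(key) or "")
--         if not group_key:
--             continue
--         grouped.setdefault(group_key, []).append(entry)
--     return grouped
-- ===== SOURCE B (Python) =====
-- from typing import Any, Dict, List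
--
-- def _group_snapshot_entries(
--     entries: List[Dict[str, Any]],
--     key: str,
-- ) -> Dict[str, List[Dict[str, Any]]]:
--     # Tag each entry with its group key, drop the empty-key ones,
--     # then build the result per distinct key (first-occurrence order).
--     keyed = [(str(entry.get(key) or ""), entry) for entry in entries]
--     keyed = [(k, entry) for (k, entry) in keyed if k]
--     order = list(dict.fromkeys(k for k, _ in keyed))
--     return {g: [entry for k, entry in keyed if k == g] for g in order}
-- ===== Notes on version B (the rewrite author's own statement) =====
-- stated objective: alternative
-- what changed: Replaces the single-pass dict accumulation with setdefault/append by a tag-filter-dedup pipeline: build (group_key, entry) pairs, drop empty keys, compute the distinct keys in first-occurrence order, and assemble each group with a per-key filter comprehension.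
import Mathlib
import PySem

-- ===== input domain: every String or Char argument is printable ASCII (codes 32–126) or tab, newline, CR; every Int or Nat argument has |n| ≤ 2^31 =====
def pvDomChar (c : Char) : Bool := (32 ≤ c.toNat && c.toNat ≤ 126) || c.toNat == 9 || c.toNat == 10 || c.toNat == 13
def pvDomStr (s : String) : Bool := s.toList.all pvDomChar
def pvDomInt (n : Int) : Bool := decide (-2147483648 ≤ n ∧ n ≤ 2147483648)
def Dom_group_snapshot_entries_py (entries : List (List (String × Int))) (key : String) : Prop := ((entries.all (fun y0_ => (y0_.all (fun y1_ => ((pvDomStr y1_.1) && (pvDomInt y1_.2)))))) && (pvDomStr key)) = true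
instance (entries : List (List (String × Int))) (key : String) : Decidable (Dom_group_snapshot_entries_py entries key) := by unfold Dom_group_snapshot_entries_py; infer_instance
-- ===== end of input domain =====

-- B groups by tagging each entry with its key, filtering, deduplicating keys and
-- building each group by a per-key filter, instead of A's setdefault/append dict loop.
-- Both ports share the helper below: str(entry.get(key) or "") (0 and a missing key
-- are falsy, so they yield "" and the entry is skipped).

-- ===== PORT A =====
def pvGroupKey (key : String) (entry : List (String × Int)) : String :=
  match (PySem.Dict.mk entry).get? key with
  | some v => if v = 0 then "" else PySem.Int.toStr v
  | none => ""

def group_snapshot_entries_py (entries : List (List (String × Int))) (key : String) : List (String × List (List (String × Int))) :=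
  (entries.foldl
    (fun grouped entry =>
      let gk := pvGroupKey key entry
      if gk = "" then grouped
      else grouped.modify gk [] (fun l => l ++ [entry]))
    PySem.Dict.empty).items

-- ===== PORT B =====
def group_snapshot_entries_py_alt (entries : List (List (String × Int))) (key : String) : List (String × List (List (String × Int))) :=
  let keyed0 := entries.map (fun entry => (pvGroupKey key entry, entry))
  let keyed := keyed0.filter (fun p => p.1 ≠ "")
  let order := PySem.List.dedup (keyed.map (fun p => p.1))
  order.map (fun g => (g, (keyed.filter (fun p => p.1 == g)).map (fun p => p.2)))

-- ===== PRECONDITION & SPEC =====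
def Spec_group_snapshot_entries_py (entries : List (List (String × Int))) (key : String) (out : List (String × List (List (String × Int)))) : Prop := out = group_snapshot_entries_py_alt entries key
instance (entries : List (List (String × Int))) (key : String) (out : List (String × List (List (String × Int)))) : Decidable (Spec_group_snapshot_entries_py entries key out) := by unfold Spec_group_snapshot_entries_py; infer_instance

-- ===== CLAIM (what is proved, stated in full; the proofs are below) =====
def Claim_equal_group_snapshot_entries_py : Prop := ∀ (entries : List (List (String × Int))) (key : String), Dom_group_snapshot_entries_py entries key → Spec_group_snapshot_entries_py entries key (group_snapshot_entries_py entries key)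

-- ===== LEMMAS AND PROOFS =====

-- A's loop (which skips empty-key entries) equals the pair-wise modify loop over
-- the tagged-and-filtered list B builds.
theorem pv_foldl_skip (key : String) (l : List (List (String × Int)))
    (init : PySem.Dict String (List (List (String × Int)))) :
    l.foldl
      (fun grouped entry =>
        let gk := pvGroupKey key entry
        if gk = "" then grouped
        else grouped.modify gk [] (fun v => v ++ [entry])) init
    = ((l.map (fun entry => (pvGroupKey key entry, entry))).filter (fun p => p.1 ≠ "")).foldl
        (fun d p => d.modify p.1 [] (fun v => v ++ [p.2])) init := by
  induction l generalizing init with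
  | nil => rfl
  | cons e t ih =>
    simp only [List.foldl_cons, List.map_cons, List.filter_cons]
    by_cases h : pvGroupKey key e = ""
    · simp [h, ih]
    · simp [h, ih]

-- ===== VERDICT (by name: the statement is the Claim_ definition above) =====
theorem group_snapshot_entries_py_spec : Claim_equal_group_snapshot_entries_py := by
  intro entries key _
  unfold Spec_group_snapshot_entries_py group_snapshot_entries_py group_snapshot_entries_py_alt
  dsimp only
  rw [pv_foldl_skip]
  set L := ((entries.map (fun entry => (pvGroupKey key entry, entry))).filter (fun p => p.1 ≠ "")) with hL
  have hkeys : (L.foldl (fun d p => d.modify p.1 [] (fun v => v ++ [p.2])) PySem.Dict.empty).keys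
      = PySem.Set.ofList (L.map (fun p => p.1)) := by
    rw [PySem.Dict.keys_foldl_modify_key L (fun p => p.1) [] (fun _ p => (fun v => v ++ [p.2]))]
    simp [PySem.Set.update, PySem.Set.ofList_eq_foldl, PySem.Dict.keys_empty]
  have hnd : (L.foldl (fun d p => d.modify p.1 [] (fun v => v ++ [p.2])) PySem.Dict.empty).keys.Nodup := by
    exact PySem.Dict.nodup_keys_foldl_modify_key L (fun p => p.1) [] (fun _ p => (fun v => v ++ [p.2]))
      PySem.Dict.empty (by simp [PySem.Dict.keys_empty])
  rw [PySem.Dict.items_eq_map_keys _ hnd [], hkeys, PySem.List.dedup_eq_ofList]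
  refine List.map_congr_left (fun g _ => ?_)
  rw [PySem.Dict.getD_foldl_modify_append L PySem.Dict.empty g]
  simp [PySem.Dict.getD_empty]
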